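-- pv_equiv track=rewrite | github.com/frilli31/Variability | variability/__init__.py | lzw
-- ===== SOURCE A (Python) =====
-- def lzw(trace):
--     dictionary = set()
--     result = ()
--     w = ()
--
--     for item in trace:
--         if w + (item, ) in dictionary:
--             w += (item, )
--         else:
--             dictionary.add(w + (item, ))
--             if w is not ():
--                 result += (w, )
--             w = (item, )
--     result += (w, )
--     return result
-- ===== SOURCE B (Python) =====
-- def lzw(trace):
--     # Incremental trie: nodes are ints (root 0); children maps (node, item) -> node;
--     # marked holds the node ids whose phrase is in the LZW dictionary.
--     children = {}
--     marked = set()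
--     next_id = 1
--     node = 0
--     w = []
--     result = []
--     for item in trace:
--         c = children.get((node, item))
--         if c is not None and c in marked:
--             node = c
--             w.append(item)
--         else:
--             if c is None:
--                 c = next_id
--                 next_id += 1
--                 children[(node, item)] = c
--             marked.add(c)
--             if w:
--                 result.append(tuple(w))
--             r = children.get((0, item))
--             if r is None:
--                 r = next_id
--                 next_id += 1
--                 children[(0, item)] = r
--             node = r
--             w = [item]
--     result.append(tuple(w))
--     return tuple(result)
-- ===== Notes on version B (the rewrite author's own statement) =====
-- stated objective: faster
-- what changed: A grows the current phrase as a tuple and tests set membership by rehashing the whole phrase each step; B walks an incremental trie of integer node ids ((node,item)->node dict plus a marked-node set), doing O(1) dict/set operations per element.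
import Mathlib
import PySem

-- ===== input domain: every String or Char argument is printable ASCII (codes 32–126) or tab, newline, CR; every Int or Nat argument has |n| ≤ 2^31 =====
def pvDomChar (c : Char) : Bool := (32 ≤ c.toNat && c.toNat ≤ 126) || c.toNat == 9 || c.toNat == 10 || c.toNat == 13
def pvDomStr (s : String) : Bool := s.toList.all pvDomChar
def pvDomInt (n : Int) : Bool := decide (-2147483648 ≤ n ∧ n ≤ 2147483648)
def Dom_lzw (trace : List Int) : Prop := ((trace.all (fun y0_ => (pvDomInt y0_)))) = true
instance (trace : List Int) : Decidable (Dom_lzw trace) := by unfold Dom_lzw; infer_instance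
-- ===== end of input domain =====

-- B replaces A's set of phrase tuples (per-step tuple concatenation + rehash) by an
-- incremental trie over integer node ids with a marked-node set; objective: faster.

-- ===== PORT A =====
-- loop body of A; state = (dictionary, result, w).  CPython interns the empty tuple,
-- so A's `w is not ()` behaves exactly as `w != ()`, ported as `w ≠ []`.
def lzwStepA (st : PySem.Set (List Int) × List (List Int) × List Int) (item : Int) :
    PySem.Set (List Int) × List (List Int) × List Int :=
  match st with
  | (d, r, w) =>
    if (w ++ [item]) ∈ d then
      (d, r, w ++ [item])
    else
      (PySem.Set.add d (w ++ [item]), if w ≠ [] then r ++ [w] else r, [item])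

def lzw (trace : List Int) : List (List Int) :=
  let st := trace.foldl lzwStepA (PySem.Set.empty, [], [])
  st.2.1 ++ [st.2.2]

-- ===== PORT B =====
-- B's loop state: trie children (node, item) ↦ node, marked node ids, next fresh id,
-- current node, result, current phrase
structure StB where
  ch : PySem.Dict (Int × Int) Int
  mks : PySem.Set Int
  nid : Int
  node : Int
  res : List (List Int)
  w : List Int

-- else-branch of B after `c` has been settled (ch1/nid1 reflect its possible allocation):
-- mark c, flush w, restart at the (possibly newly created) root child for item
def lzwMiss (st : StB) (item : Int) (c : Int) (ch1 : PySem.Dict (Int × Int) Int)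
    (nid1 : Int) : StB :=
  let mk1 := PySem.Set.add st.mks c
  let res1 := if st.w ≠ [] then st.res ++ [st.w] else st.res
  match ch1.get? (0, item) with
  | some r => ⟨ch1, mk1, nid1, r, res1, [item]⟩
  | none => ⟨ch1.insert (0, item) nid1, mk1, nid1 + 1, nid1, res1, [item]⟩

def lzwStepB (st : StB) (item : Int) : StB :=
  match st.ch.get? (st.node, item) with
  | some c =>
      if c ∈ st.mks then
        { st with node := c, w := st.w ++ [item] }
      else
        lzwMiss st item c st.ch st.nid
  | none =>
      lzwMiss st item st.nid (st.ch.insert (st.node, item) st.nid) (st.nid + 1)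

def lzw_alt (trace : List Int) : List (List Int) :=
  let st := trace.foldl lzwStepB ⟨PySem.Dict.empty, PySem.Set.empty, 1, 0, [], []⟩
  st.res ++ [st.w]

-- ===== PRECONDITION & SPEC =====
def Spec_lzw (trace : List Int) (out : List (List Int)) : Prop := out = lzw_alt trace
instance (trace : List Int) (out : List (List Int)) : Decidable (Spec_lzw trace out) := by unfold Spec_lzw; infer_instance

-- ===== CLAIM (what is proved, stated in full; the proofs are below) =====
def Claim_equal_lzw : Prop := ∀ (trace : List Int), Dom_lzw trace → Spec_lzw trace (lzw trace)

-- ===== LEMMAS AND PROOFS =====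

-- The simulation invariant: φ names the phrase spelled by the trie path to each node.
structure SimInv (d : PySem.Set (List Int)) (r : List (List Int)) (w : List Int)
    (st : StB) (φ : Int → Option (List Int)) : Prop where
  root : φ 0 = some []
  pos : 1 ≤ st.nid
  edge : ∀ n i c, st.ch.get? (n, i) = some c → ∃ p, φ n = some p ∧ φ c = some (p ++ [i])
  inj : ∀ a b p, φ a = some p → φ b = some p → a = b
  memb : ∀ p, p ∈ d ↔ ∃ c, c ∈ st.mks ∧ φ c = some p
  cur : φ st.node = some w
  fresh : ∀ n, st.nid ≤ n → φ n = none
  dom : ∀ c p, φ c = some p → c = 0 ∨ ∃ n i, st.ch.get? (n, i) = some c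
  mkdef : ∀ c, c ∈ st.mks → ∃ p, φ c = some p
  reseq : st.res = r
  weq : st.w = w

theorem snoc_inj {p q : List Int} {i j : Int} (h : p ++ [i] = q ++ [j]) : p = q ∧ i = j := by
  obtain ⟨h1, h2⟩ := List.append_inj' h rfl
  exact ⟨h1, by simpa using h2⟩

-- nodes with a phrase are below the fresh counter
theorem phi_lt {φ : Int → Option (List Int)} {nid : Int}
    (hfresh : ∀ n, nid ≤ n → φ n = none) {x : Int} {p : List Int}
    (h : φ x = some p) : x < nid := by
  by_contra hge
  rw [hfresh x (by omega)] at h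
  cases h

-- introduction rule for SimInv with the B-state given componentwise
theorem simInv_intro (d : PySem.Set (List Int)) (r : List (List Int)) (w : List Int)
    (ch : PySem.Dict (Int × Int) Int) (mks : PySem.Set Int) (nid node : Int)
    (res : List (List Int)) (wB : List Int) (φ : Int → Option (List Int))
    (root : φ 0 = some [])
    (pos : 1 ≤ nid)
    (edge : ∀ n i c, ch.get? (n, i) = some c → ∃ p, φ n = some p ∧ φ c = some (p ++ [i]))
    (inj : ∀ a b p, φ a = some p → φ b = some p → a = b)
    (memb : ∀ p, p ∈ d ↔ ∃ c, c ∈ mks ∧ φ c = some p)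
    (cur : φ node = some wB)
    (fresh : ∀ n, nid ≤ n → φ n = none)
    (dom : ∀ c p, φ c = some p → c = 0 ∨ ∃ n i, ch.get? (n, i) = some c)
    (mkdef : ∀ c, c ∈ mks → ∃ p, φ c = some p)
    (reseq : res = r) (weq : wB = w) :
    SimInv d r w ⟨ch, mks, nid, node, res, wB⟩ φ :=
  ⟨root, pos, edge, inj, memb, weq ▸ cur, fresh, dom, mkdef, reseq, weq⟩

-- invariant preservation through the else-branch helper
theorem miss_inv (d : PySem.Set (List Int)) (r : List (List Int)) (w : List Int)
    (st : StB) (item cnode : Int) (ch1 : PySem.Dict (Int × Int) Int) (nid1 : Int)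
    (φ1 : Int → Option (List Int))
    (hroot : φ1 0 = some [])
    (hpos : 1 ≤ nid1)
    (hedge : ∀ n i c, ch1.get? (n, i) = some c → ∃ p, φ1 n = some p ∧ φ1 c = some (p ++ [i]))
    (hinj : ∀ a b p, φ1 a = some p → φ1 b = some p → a = b)
    (hmemb : ∀ p, p ∈ d ↔ ∃ c, c ∈ st.mks ∧ φ1 c = some p)
    (hc : φ1 cnode = some (w ++ [item]))
    (hfresh : ∀ n, nid1 ≤ n → φ1 n = none)
    (hdom : ∀ c p, φ1 c = some p → c = 0 ∨ ∃ n i, ch1.get? (n, i) = some c)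
    (hmkdef : ∀ c, c ∈ st.mks → ∃ p, φ1 c = some p)
    (hres : st.res = r) (hw : st.w = w)
    (hno : ch1.get? (0, item) = none → w ≠ []) :
    ∃ φ', SimInv (PySem.Set.add d (w ++ [item])) (if w ≠ [] then r ++ [w] else r) [item]
      (lzwMiss st item cnode ch1 nid1) φ' := by
  cases h0 : ch1.get? (0, item) with
  | some rt =>
    have hcur : φ1 rt = some [item] := by
      obtain ⟨p, hp0, hprt⟩ := hedge 0 item rt h0
      rw [hroot] at hp0
      cases hp0
      simpa using hprt
    have hM : lzwMiss st item cnode ch1 nid1 =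
        ⟨ch1, PySem.Set.add st.mks cnode, nid1, rt, if w ≠ [] then r ++ [w] else r, [item]⟩ := by
      simp only [lzwMiss, h0, hres, hw]
    rw [hM]
    refine ⟨φ1, simInv_intro _ _ _ _ _ _ _ _ _ _ hroot hpos hedge hinj ?_ hcur hfresh hdom ?_ rfl rfl⟩
    · intro p
      rw [PySem.Set.mem_add]
      constructor
      · rintro (hpd | hpe)
        · obtain ⟨c', hcm, hcp⟩ := (hmemb p).1 hpd
          exact ⟨c', by rw [PySem.Set.mem_add]; exact Or.inl hcm, hcp⟩
        · exact ⟨cnode, by rw [PySem.Set.mem_add]; exact Or.inr rfl, hpe ▸ hc⟩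
      · rintro ⟨c', hcm, hcp⟩
        rw [PySem.Set.mem_add] at hcm
        rcases hcm with hcm | heq
        · exact Or.inl ((hmemb p).2 ⟨c', hcm, hcp⟩)
        · rw [heq, hc] at hcp
          exact Or.inr (Option.some.inj hcp).symm
    · intro c' hcm
      rw [PySem.Set.mem_add] at hcm
      rcases hcm with hcm | heq
      · exact hmkdef c' hcm
      · exact ⟨_, heq ▸ hc⟩
  | none =>
    have hwne : w ≠ [] := hno h0
    have hcl : cnode < nid1 := phi_lt hfresh hc
    -- no existing node spells [item]
    have hnoitem : ∀ b, φ1 b = some [item] → False := by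
      intro b hb
      rcases hdom b [item] hb with hb0 | ⟨n', i', he⟩
      · rw [hb0, hroot] at hb; cases hb
      · obtain ⟨p, hpn, hpb⟩ := hedge n' i' b he
        rw [hb] at hpb
        have h2 : p ++ [i'] = [] ++ [item] := by simpa using (Option.some.inj hpb).symm
        obtain ⟨hp1, hp2⟩ := snoc_inj h2
        have hn0 : n' = 0 := hinj n' 0 [] (hp1 ▸ hpn) hroot
        rw [hn0, hp2, h0] at he
        cases he
    have hM : lzwMiss st item cnode ch1 nid1 =
        ⟨ch1.insert (0, item) nid1, PySem.Set.add st.mks cnode, nid1 + 1, nid1,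
          if w ≠ [] then r ++ [w] else r, [item]⟩ := by
      simp only [lzwMiss, h0, hres, hw]
    rw [hM]
    -- φ1 extended at the fresh node nid1 with the phrase [item]
    refine ⟨fun n => if n = nid1 then some [item] else φ1 n,
      simInv_intro _ _ _ _ _ _ _ _ _ _ ?_ (by omega) ?_ ?_ ?_ (by simp) ?_ ?_ ?_ rfl rfl⟩
    · show (if (0 : Int) = nid1 then some [item] else φ1 0) = some []
      rw [if_neg (by omega : ¬ (0 : Int) = nid1)]
      exact hroot
    · intro n i c' hget
      rw [PySem.Dict.get?_insert] at hget
      by_cases hk : (n, i) = ((0 : Int), item)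
      · rw [if_pos hk] at hget
        obtain ⟨hk1, hk2⟩ := Prod.mk.injEq .. ▸ hk
        refine ⟨[], ?_, ?_⟩
        · show (if n = nid1 then some [item] else φ1 n) = some []
          rw [hk1, if_neg (by omega : ¬ (0 : Int) = nid1)]
          exact hroot
        · show (if c' = nid1 then some [item] else φ1 c') = some ([] ++ [i])
          cases hget
          rw [hk2, if_pos rfl]
          simp
      · rw [if_neg hk] at hget
        obtain ⟨p, hpn, hpc⟩ := hedge n i c' hget
        have hn1 : n ≠ nid1 := by have := phi_lt hfresh hpn; omega
        have hc1 : c' ≠ nid1 := by have := phi_lt hfresh hpc; omega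
        exact ⟨p, by show (if n = nid1 then _ else _) = _; rw [if_neg hn1]; exact hpn,
          by show (if c' = nid1 then _ else _) = _; rw [if_neg hc1]; exact hpc⟩
    · intro a b p ha hb
      replace ha : (if a = nid1 then some [item] else φ1 a) = some p := ha
      replace hb : (if b = nid1 then some [item] else φ1 b) = some p := hb
      by_cases ha1 : a = nid1 <;> by_cases hb1 : b = nid1
      · omega
      · rw [if_pos ha1] at ha; rw [if_neg hb1] at hb
        cases ha
        exact absurd hb (fun hx => hnoitem b hx)
      · rw [if_neg ha1] at ha; rw [if_pos hb1] at hb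
        cases hb
        exact absurd ha (fun hx => hnoitem a hx)
      · rw [if_neg ha1] at ha; rw [if_neg hb1] at hb
        exact hinj a b p ha hb
    · intro p
      rw [PySem.Set.mem_add]
      constructor
      · rintro (hpd | hpe)
        · obtain ⟨c', hcm, hcp⟩ := (hmemb p).1 hpd
          have hne : c' ≠ nid1 := by have := phi_lt hfresh hcp; omega
          exact ⟨c', by rw [PySem.Set.mem_add]; exact Or.inl hcm,
            by show (if c' = nid1 then _ else _) = _; rw [if_neg hne]; exact hcp⟩
        · exact ⟨cnode, by rw [PySem.Set.mem_add]; exact Or.inr rfl,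
            by show (if cnode = nid1 then _ else _) = _
               rw [if_neg (by omega : cnode ≠ nid1)]; exact hpe ▸ hc⟩
      · rintro ⟨c', hcm, hcp⟩
        replace hcp : (if c' = nid1 then some [item] else φ1 c') = some p := hcp
        rw [PySem.Set.mem_add] at hcm
        rcases hcm with hcm | heq
        · obtain ⟨q, hq⟩ := hmkdef c' hcm
          have hne : c' ≠ nid1 := by have := phi_lt hfresh hq; omega
          rw [if_neg hne] at hcp
          exact Or.inl ((hmemb p).2 ⟨c', hcm, hcp⟩)
        · rw [heq, if_neg (by omega : cnode ≠ nid1), hc] at hcp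
          exact Or.inr (Option.some.inj hcp).symm
    · intro n hn
      show (if n = nid1 then some [item] else φ1 n) = none
      rw [if_neg (by omega : n ≠ nid1)]
      exact hfresh n (by omega)
    · intro c' p hcp
      replace hcp : (if c' = nid1 then some [item] else φ1 c') = some p := hcp
      by_cases hc1 : c' = nid1
      · exact Or.inr ⟨0, item, by rw [hc1]; exact PySem.Dict.get?_insert_self ..⟩
      · rw [if_neg hc1] at hcp
        rcases hdom c' p hcp with hcz | ⟨n, i, he⟩
        · exact Or.inl hcz
        · refine Or.inr ⟨n, i, ?_⟩
          rw [PySem.Dict.get?_insert]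
          have hk : ¬ (n, i) = ((0 : Int), item) := by
            intro hk
            obtain ⟨hk1, hk2⟩ := Prod.mk.injEq .. ▸ hk
            rw [hk1, hk2, h0] at he
            cases he
          rw [if_neg hk]
          exact he
    · intro c' hcm
      rw [PySem.Set.mem_add] at hcm
      rcases hcm with hcm | heq
      · obtain ⟨q, hq⟩ := hmkdef c' hcm
        have hne : c' ≠ nid1 := by have := phi_lt hfresh hq; omega
        exact ⟨q, by show (if c' = nid1 then _ else _) = _; rw [if_neg hne]; exact hq⟩
      · exact ⟨w ++ [item], by
          show (if c' = nid1 then _ else _) = _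
          rw [heq, if_neg (by omega : cnode ≠ nid1)]
          exact hc⟩

-- one loop iteration preserves the simulation
theorem step_sim (d : PySem.Set (List Int)) (r : List (List Int)) (w : List Int)
    (st : StB) (φ : Int → Option (List Int)) (item : Int) (h : SimInv d r w st φ) :
    ∃ φ', SimInv (lzwStepA (d, r, w) item).1 (lzwStepA (d, r, w) item).2.1
      (lzwStepA (d, r, w) item).2.2 (lzwStepB st item) φ' := by
  have hnodelt : st.node < st.nid := phi_lt h.fresh h.cur
  have hnode0 : w = [] → st.node = 0 := by
    intro hwnil
    exact h.inj st.node 0 [] (hwnil ▸ h.cur) h.root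
  -- A's membership test agrees with B's marked-edge test
  have hiff : (w ++ [item]) ∈ d ↔
      ∃ c, st.ch.get? (st.node, item) = some c ∧ c ∈ st.mks := by
    constructor
    · intro hm
      obtain ⟨c, hcm, hcp⟩ := (h.memb _).1 hm
      rcases h.dom c _ hcp with rfl | ⟨n, i, he⟩
      · rw [h.root] at hcp
        exact absurd (Option.some.inj hcp) (by simp)
      · obtain ⟨p, hpn, hpc⟩ := h.edge n i c he
        rw [hcp] at hpc
        obtain ⟨rfl, rfl⟩ := snoc_inj (Option.some.inj hpc).symm
        have : n = st.node := h.inj n st.node _ hpn h.cur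
        exact ⟨c, this ▸ he, hcm⟩
    · rintro ⟨c, he, hcm⟩
      obtain ⟨p, hpn, hpc⟩ := h.edge _ _ c he
      rw [h.cur] at hpn
      cases hpn
      exact (h.memb _).2 ⟨c, hcm, hpc⟩
  by_cases hm : (w ++ [item]) ∈ d
  · obtain ⟨c, he, hcm⟩ := hiff.1 hm
    obtain ⟨p, hpn, hpc⟩ := h.edge _ _ c he
    rw [h.cur] at hpn
    cases hpn
    refine ⟨φ, ?_⟩
    simp only [lzwStepA, if_pos hm, lzwStepB, he, if_pos hcm]
    exact { h with cur := hpc, weq := by rw [h.weq] }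
  · have hA : lzwStepA (d, r, w) item =
        (PySem.Set.add d (w ++ [item]), if w ≠ [] then r ++ [w] else r, [item]) := by
      simp only [lzwStepA, if_neg hm]
    rw [hA]
    cases hget : st.ch.get? (st.node, item) with
    | some c =>
      have hcnm : c ∉ st.mks := fun hcm => hm (hiff.2 ⟨c, hget, hcm⟩)
      have hc : φ c = some (w ++ [item]) := by
        obtain ⟨p, hpn, hpc⟩ := h.edge _ _ c hget
        rw [h.cur] at hpn
        cases hpn
        exact hpc
      simp only [lzwStepB, hget, if_neg hcnm]
      exact miss_inv d r w st item c st.ch st.nid φ h.root h.pos h.edge h.inj h.memb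
        hc h.fresh h.dom h.mkdef h.reseq h.weq
        (by intro h0 hwnil
            rw [hnode0 hwnil] at hget
            rw [h0] at hget; cases hget)
    | none =>
      simp only [lzwStepB, hget]
      -- φ extended at the fresh node st.nid with the new phrase
      set φ1 : Int → Option (List Int) :=
        fun n => if n = st.nid then some (w ++ [item]) else φ n with hφ1
      have hφ1x : ∀ x, φ1 x = if x = st.nid then some (w ++ [item]) else φ x :=
        fun x => rfl
      have hnophrase : ∀ b, φ b = some (w ++ [item]) → False := by
        intro b hb
        rcases h.dom b _ hb with rfl | ⟨n', i', he⟩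
        · rw [h.root] at hb
          exact absurd (Option.some.inj hb) (by simp)
        · obtain ⟨p, hpn, hpb⟩ := h.edge n' i' b he
          rw [hb] at hpb
          obtain ⟨rfl, rfl⟩ := snoc_inj (Option.some.inj hpb).symm
          have : n' = st.node := h.inj n' st.node _ hpn h.cur
          rw [this, hget] at he; cases he
      have hold : ∀ x p, φ x = some p → φ1 x = some p := by
        intro x p hx
        have : x ≠ st.nid := by have := phi_lt h.fresh hx; omega
        rw [hφ1x, if_neg this]; exact hx
      refine miss_inv d r w st item st.nid _ _ φ1 (hold 0 [] h.root) (by have := h.pos; omega)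
        ?_ ?_ ?_ (by rw [hφ1x]; simp) ?_ ?_ ?_ h.reseq h.weq ?_
      · -- edges of ch.insert (node, item) nid
        intro n i c' hg
        rw [PySem.Dict.get?_insert] at hg
        by_cases hk : (n, i) = (st.node, item)
        · rw [if_pos hk] at hg
          obtain ⟨rfl, rfl⟩ := Prod.mk.injEq .. ▸ hk
          cases hg
          exact ⟨w, hold _ _ h.cur, by rw [hφ1x]; simp⟩
        · rw [if_neg hk] at hg
          obtain ⟨p, hpn, hpc⟩ := h.edge n i c' hg
          exact ⟨p, hold _ _ hpn, hold _ _ hpc⟩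
      · -- injectivity of φ1
        intro a b p ha hb
        rw [hφ1x] at ha
        rw [hφ1x] at hb
        by_cases ha1 : a = st.nid <;> by_cases hb1 : b = st.nid
        · omega
        · rw [if_pos ha1] at ha; rw [if_neg hb1] at hb
          cases ha
          exact absurd hb (fun hx => hnophrase b hx)
        · rw [if_neg ha1] at ha; rw [if_pos hb1] at hb
          cases hb
          exact absurd ha (fun hx => hnophrase a hx)
        · rw [if_neg ha1] at ha; rw [if_neg hb1] at hb
          exact h.inj a b p ha hb
      · -- membership through φ1
        intro p
        rw [h.memb p]
        constructor
        · rintro ⟨c', hcm, hcp⟩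
          exact ⟨c', hcm, hold _ _ hcp⟩
        · rintro ⟨c', hcm, hcp⟩
          obtain ⟨q, hq⟩ := h.mkdef c' hcm
          rw [hold _ _ hq] at hcp
          cases hcp
          exact ⟨c', hcm, hq⟩
      · -- freshness above nid + 1
        intro n hn
        rw [hφ1x, if_neg (by omega : n ≠ st.nid)]
        exact h.fresh n (by omega)
      · -- dom through the inserted edge
        intro c' p hcp
        rw [hφ1x] at hcp
        by_cases hc1 : c' = st.nid
        · subst hc1
          exact Or.inr ⟨st.node, item, PySem.Dict.get?_insert_self ..⟩
        · rw [if_neg hc1] at hcp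
          rcases h.dom c' p hcp with rfl | ⟨n, i, he⟩
          · exact Or.inl rfl
          · refine Or.inr ⟨n, i, ?_⟩
            rw [PySem.Dict.get?_insert]
            have hk : ¬ (n, i) = (st.node, item) := by
              intro hk
              obtain ⟨rfl, rfl⟩ := Prod.mk.injEq .. ▸ hk
              rw [hget] at he; cases he
            rw [if_neg hk]
            exact he
      · intro c' hcm
        obtain ⟨q, hq⟩ := h.mkdef c' hcm
        exact ⟨q, hold _ _ hq⟩
      · -- if even the root child for item is missing, w cannot be empty
        intro h0 hwnil
        have : st.node = 0 := hnode0 hwnil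
        rw [this] at h0
        rw [PySem.Dict.get?_insert_self] at h0
        cases h0

-- the simulation carried through the whole fold
theorem fold_sim (trace : List Int) : ∀ (d : PySem.Set (List Int)) (r : List (List Int))
    (w : List Int) (st : StB) (φ : Int → Option (List Int)), SimInv d r w st φ →
    ∃ φ', SimInv (trace.foldl lzwStepA (d, r, w)).1 (trace.foldl lzwStepA (d, r, w)).2.1
      (trace.foldl lzwStepA (d, r, w)).2.2 (trace.foldl lzwStepB st) φ' := by
  induction trace with
  | nil => exact fun d r w st φ h => ⟨φ, h⟩
  | cons x xs ih =>
    intro d r w st φ h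
    obtain ⟨φ', h'⟩ := step_sim d r w st φ x h
    simpa only [List.foldl_cons] using
      ih (lzwStepA (d, r, w) x).1 (lzwStepA (d, r, w) x).2.1 (lzwStepA (d, r, w) x).2.2
        (lzwStepB st x) φ' h'

theorem init_inv : SimInv PySem.Set.empty [] [] ⟨PySem.Dict.empty, PySem.Set.empty, 1, 0, [], []⟩
    (fun n => if n = 0 then some [] else none) := by
  refine simInv_intro _ _ _ _ _ _ _ _ _ _ (by simp) (by norm_num) ?_ ?_ ?_ (by simp) ?_ ?_ ?_ rfl rfl
  · intro n i c hg
    simp [PySem.Dict.get?_empty] at hg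
  · intro a b p ha hb
    replace ha : (if a = 0 then some [] else none) = some p := ha
    replace hb : (if b = 0 then some [] else none) = some p := hb
    by_cases h1 : a = 0 <;> by_cases h2 : b = 0
    · omega
    · rw [if_neg h2] at hb; cases hb
    · rw [if_neg h1] at ha; cases ha
    · rw [if_neg h1] at ha; cases ha
  · intro p
    simp [PySem.Set.empty]
  · intro n hn
    show (if n = 0 then some [] else none) = none
    rw [if_neg (by omega : n ≠ 0)]
  · intro c p hcp
    replace hcp : (if c = 0 then some [] else none) = some p := hcp
    by_cases h1 : c = 0
    · exact Or.inl h1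
    · rw [if_neg h1] at hcp; cases hcp
  · intro c hcm
    simp [PySem.Set.empty] at hcm

-- ===== VERDICT (by name: the statement is the Claim_ definition above) =====
theorem lzw_spec : Claim_equal_lzw := by
  intro trace _
  show lzw trace = lzw_alt trace
  obtain ⟨φ', h'⟩ := fold_sim trace PySem.Set.empty [] []
    ⟨PySem.Dict.empty, PySem.Set.empty, 1, 0, [], []⟩
    (fun n => if n = 0 then some [] else none) init_inv
  simp only [lzw, lzw_alt]
  rw [h'.reseq, h'.weq]
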